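-- pv_equiv track=rewrite | github.com/paiml/depyler | examples/hard_run_stats.py | running_min
-- ===== SOURCE A (Python) =====
-- def running_min(data: list[int]) -> list[int]:
--     result: list[int] = []
--     if len(data) == 0:
--         return result
--     current_min: int = data[0]
--     result.append(current_min)
--     i: int = 1
--     while i < len(data):
--         if data[i] < current_min:
--             current_min = data[i]
--         result.append(current_min)
--         i = i + 1
--     return result
-- ===== SOURCE B (Python) =====
-- def running_min(data: list[int]) -> list[int]:
--     # Divide and conquer: the prefix-min array of the whole list is the
--     # prefix-min array of the left half followed by the right half's
--     # prefix-min array clamped by the left half's minimum (its last entry).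
--     if not data:
--         return []
--     half = len(data) // 2
--     if half == 0:
--         return [data[0]]
--     left = running_min(data[:half])
--     m = left[-1]
--     right = running_min(data[half:])
--     return left + [v if v < m else m for v in right]
-- ===== Notes on version B (the rewrite author's own statement) =====
-- stated objective: alternative
-- what changed: Replaces the single explicit accumulator loop by a divide-and-conquer recursion: compute prefix-mins of each half independently and clamp the right half's prefix-mins by the left half's minimum.
import Mathlib
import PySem

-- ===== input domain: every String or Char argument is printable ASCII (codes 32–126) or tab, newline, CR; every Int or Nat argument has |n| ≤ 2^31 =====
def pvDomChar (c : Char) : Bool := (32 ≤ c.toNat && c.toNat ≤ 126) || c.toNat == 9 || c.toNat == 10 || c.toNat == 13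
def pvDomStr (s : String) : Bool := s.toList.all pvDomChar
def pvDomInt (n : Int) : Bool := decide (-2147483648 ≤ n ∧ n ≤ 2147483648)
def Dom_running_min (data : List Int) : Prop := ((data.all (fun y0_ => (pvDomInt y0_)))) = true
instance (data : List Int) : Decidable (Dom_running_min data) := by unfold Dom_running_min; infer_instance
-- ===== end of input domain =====

-- B replaces A's single accumulator loop by a divide-and-conquer recursion on halves; alternative decomposition, same values.


-- ===== PORT A =====
-- while loop: i, current_min and result are the loop state; data[i] is in range since i < len
def running_min_loop (data : List Int) (i : Nat) (cm : Int) (result : List Int) : List Int :=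
  if h : i < data.length then
    let d := data[i]
    let cm' := if d < cm then d else cm
    running_min_loop data (i + 1) cm' (result ++ [cm'])
  else result
termination_by data.length - i

def running_min (data : List Int) : List Int :=
  match data with
  | [] => []
  | x :: _ => running_min_loop data 1 x [x]

-- ===== PORT B =====
-- divide and conquer on the two halves; left[-1] is taken with getLastD (left is nonempty, so exact)
def running_min_alt (data : List Int) : List Int :=
  if data.isEmpty then []
  else
    let half := data.length / 2
    if h : half = 0 then [data[0]!]
    else
      let left := running_min_alt (data.take half)
      let m := left.getLastD 0
      let right := running_min_alt (data.drop half)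
      left ++ right.map (fun v => if v < m then v else m)
termination_by data.length
decreasing_by
  · simp only [List.length_take]; omega
  · simp only [List.length_drop]; omega

-- ===== PRECONDITION & SPEC =====
def Spec_running_min (data : List Int) (out : List Int) : Prop := out = running_min_alt data
instance (data : List Int) (out : List Int) : Decidable (Spec_running_min data out) := by unfold Spec_running_min; infer_instance

-- ===== CLAIM (what is proved, stated in full; the proofs are below) =====
def Claim_equal_running_min : Prop := ∀ (data : List Int), Dom_running_min data → Spec_running_min data (running_min data)

-- ===== LEMMAS AND PROOFS =====
-- reference prefix-min: accumMin a l = running minima of l seeded with a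
def accumMin (acc : Int) : List Int → List Int
  | [] => []
  | x :: xs => let m := min acc x; m :: accumMin m xs

def refMin : List Int → List Int
  | [] => []
  | x :: xs => x :: accumMin x xs

theorem running_min_loop_eq (data : List Int) (i : Nat) (cm : Int) (result : List Int) :
    running_min_loop data i cm result = result ++ accumMin cm (data.drop i) := by
  fun_induction running_min_loop data i cm result with
  | case1 i cm result h d cm' ih =>
      rw [ih]
      have hd : data.drop i = data[i] :: data.drop (i + 1) := List.drop_eq_getElem_cons h
      rw [hd, accumMin]
      have hm : cm' = min cm data[i] := by
        simp only [cm', d, min_def]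
        split <;> split <;> omega
      simp [hm, List.append_assoc]
  | case2 i cm result h =>
      rw [List.drop_eq_nil_of_le (by omega)]
      simp [accumMin]

theorem accumMin_append (a : Int) (l r : List Int) :
    accumMin a (l ++ r) = accumMin a l ++ accumMin (l.foldl min a) r := by
  induction l generalizing a with
  | nil => simp [accumMin]
  | cons x xs ih => simp [accumMin, ih]

theorem accumMin_min_map (m a : Int) (l : List Int) :
    accumMin (min m a) l = (accumMin a l).map (fun v => min m v) := by
  induction l generalizing a with
  | nil => simp [accumMin]
  | cons x xs ih =>
      simp only [accumMin, List.map_cons, min_assoc]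
      exact congrArg _ (ih (min a x))

theorem accumMin_getLastD (a : Int) (l : List Int) :
    (accumMin a l).getLastD a = l.foldl min a := by
  induction l generalizing a with
  | nil => simp [accumMin]
  | cons x xs ih =>
      simp only [accumMin, List.getLastD_cons, List.foldl_cons]
      exact ih (min a x)

theorem running_min_alt_eq (data : List Int) : running_min_alt data = refMin data := by
  fun_induction running_min_alt data with
  | case1 data h =>
      have : data = [] := by simpa [List.isEmpty_iff] using h
      simp [this, refMin]
  | case2 data h1 half hh =>
      have hne : data ≠ [] := by simpa [List.isEmpty_iff] using h1
      have hpos : 0 < data.length := List.length_pos_of_ne_nil hne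
      have hlen : data.length = 1 := by simp only [half] at hh; omega
      match data, hlen with
      | [x], _ => simp [refMin, accumMin]
  | case3 data h1 half hh left m right ih2 ih1 =>
      have hne : data ≠ [] := by simpa [List.isEmpty_iff] using h1
      have hpos : 0 < data.length := List.length_pos_of_ne_nil hne
      have hhn : data.length / 2 ≠ 0 := by simpa [half] using hh
      have hlen : 1 ≤ half ∧ half < data.length := by
        simp only [half]; omega
      simp only [left, right, m] at *
      obtain ⟨t, ts, hts⟩ : ∃ t ts, data.take half = t :: ts := by
        cases hc : data.take half with
        | nil => exfalso; have hl := congrArg List.length hc; rw [List.length_take, List.length_nil] at hl; omega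
        | cons t ts => exact ⟨t, ts, rfl⟩
      obtain ⟨u, us, hus⟩ : ∃ u us, data.drop half = u :: us := by
        cases hc : data.drop half with
        | nil => exfalso; have hl := congrArg List.length hc; rw [List.length_drop, List.length_nil] at hl; omega
        | cons u us => exact ⟨u, us, rfl⟩
      have hsplit : data = (t :: ts) ++ (u :: us) := by
        rw [← hts, ← hus, List.take_append_drop]
      have hm : (refMin (t :: ts)).getLastD 0 = ts.foldl min t := by
        simp only [refMin, List.getLastD_cons]
        exact accumMin_getLastD t ts
      rw [ih1, ih2, hts, hus, hm]
      symm
      conv_lhs => rw [hsplit]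
      have key : accumMin t (ts ++ u :: us)
          = accumMin t ts ++ (u :: accumMin u us).map (fun v => min (ts.foldl min t) v) := by
        rw [accumMin_append]
        congr 1
        simp only [accumMin, List.map_cons]
        congr 1
        have := accumMin_min_map (ts.foldl min t) u us
        simpa [min_comm] using this
      simp only [refMin, List.cons_append]
      congr 1
      rw [key]
      congr 1
      apply List.map_congr_left
      intro v _
      rw [min_def]
      split <;> split <;> omega

-- ===== VERDICT (by name: the statement is the Claim_ definition above) =====
theorem running_min_spec : Claim_equal_running_min := by
  intro data _
  unfold Spec_running_min
  rw [running_min_alt_eq]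
  cases data with
  | nil => rfl
  | cons x xs =>
      simp [running_min, running_min_loop_eq, refMin]
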